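-- pv_equiv track=rewrite | github.com/cirosantilli/project-euler-solvers | solvers/685.py | count_deficit_sequences
-- ===== SOURCE A (Python) =====
-- def comb(n: int, k: int) -> int:
--     """Exact binomial C(n,k) for large n but (typically) small k."""
--     if k < 0 or k > n:
--         return 0
--     k = min(k, n - k)
--     if k == 0:
--         return 1
--     res = 1
--     # Multiplicative formula avoids factorials.
--     for i in range(1, k + 1):
--         res = (res * (n - k + i)) // i
--     return res
--
-- def count_deficit_sequences(length: int, deficit: int) -> int:
--     """
--     Count sequences (x_1..x_length) with 0<=x_i<=9 and sum x_i = deficit.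
--
--     This is the coefficient of z^deficit in (1+z+...+z^9)^length, computed by
--     inclusion-exclusion on the upper bound 9.
--     """
--     if deficit < 0:
--         return 0
--     if length == 0:
--         return 1 if deficit == 0 else 0
--
--     # Inclusion-exclusion:
--     # number of nonnegative solutions with x_i<=9:
--     # sum_{j>=0} (-1)^j * C(length, j) * C(deficit - 10j + length - 1, deficit - 10j)
--     res = 0
--     max_j = deficit // 10
--     for j in range(max_j + 1):
--         d = deficit - 10 * j
--         term = comb(length, j) * comb(d + length - 1, d)
--         res = res - term if (j & 1) else res + term
--     return res
-- ===== SOURCE B (Python) =====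
-- def count_deficit_sequences(length: int, deficit: int) -> int:
--     """
--     Count sequences (x_1..x_length) with 0<=x_i<=9 and sum x_i = deficit.
--
--     Computed as the coefficient of z^deficit in (1+z+...+z^9)^length, obtained
--     by binary exponentiation of the polynomial, truncating at degree deficit.
--     """
--     if length < 0 or deficit < 0:
--         return 0
--     limit = deficit + 1  # keep coefficients of z^0 .. z^deficit only
--
--     def mul(p, q):
--         n = min(len(p) + len(q) - 1, limit)
--         return [
--             sum(p[i] * q[s - i] for i in range(s + 1)
--                 if i < len(p) and s - i < len(q))
--             for s in range(n)
--         ]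
--
--     base = [1] * min(10, limit)  # 1 + z + ... + z^9, truncated
--     result = [1]
--     e = length
--     while e > 0:
--         if e & 1:
--             result = mul(result, base)
--         base = mul(base, base)
--         e >>= 1
--     return result[deficit] if deficit < len(result) else 0
-- ===== Notes on version B (the rewrite author's own statement) =====
-- stated objective: alternative
-- what changed: Replaced the inclusion-exclusion sum of binomial coefficients by binary exponentiation of the polynomial 1+z+...+z^9 with products truncated at degree deficit, reading off the z^deficit coefficient.
import Mathlib
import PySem

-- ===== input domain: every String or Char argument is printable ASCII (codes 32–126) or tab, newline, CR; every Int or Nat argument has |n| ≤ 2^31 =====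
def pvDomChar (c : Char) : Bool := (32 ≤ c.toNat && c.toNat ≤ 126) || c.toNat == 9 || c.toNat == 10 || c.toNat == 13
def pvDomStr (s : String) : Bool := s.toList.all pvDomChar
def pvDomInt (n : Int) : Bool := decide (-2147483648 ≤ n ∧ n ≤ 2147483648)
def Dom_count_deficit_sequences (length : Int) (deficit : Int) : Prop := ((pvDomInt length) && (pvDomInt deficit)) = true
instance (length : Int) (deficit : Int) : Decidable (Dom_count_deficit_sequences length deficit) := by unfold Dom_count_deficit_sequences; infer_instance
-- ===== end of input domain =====

-- B replaces A's inclusion-exclusion binomial sum by binary exponentiation of the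
-- B replaces A's inclusion-exclusion binomial sum by binary exponentiation of the
-- polynomial 1+z+...+z^9 truncated at degree `deficit` (a different algorithm; not faster).

-- ===== PORT A =====
-- port of the helper `comb` (multiplicative binomial formula with floor division)
def combA (n : Int) (k : Int) : Int :=
  if k < 0 ∨ n < k then 0
  else
    let k' := min k (n - k)
    if k' = 0 then 1
    else
      (PySem.List.pyRange 1 (k' + 1) 1).foldl
        (fun res i => PySem.Int.floordiv (res * (n - k' + i)) i) 1

def count_deficit_sequences (length : Int) (deficit : Int) : Int :=
  if deficit < 0 then 0
  else if length = 0 then (if deficit = 0 then 1 else 0)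
  else
    let maxJ := PySem.Int.floordiv deficit 10
    -- `j & 1` in Python: every j drawn from range(0, maxJ+1) is nonnegative, where j & 1 = j % 2
    (PySem.List.pyRange 0 (maxJ + 1) 1).foldl
      (fun res j =>
        let d := deficit - 10 * j
        let term := combA length j * combA (d + length - 1) d
        if PySem.Int.mod j 2 = 1 then res - term else res + term) 0

-- ===== PORT B =====
-- port of Source B's nested helper `mul`: truncated polynomial product
def mulT (limit : Nat) (p : List Int) (q : List Int) : List Int :=
  let n := min (p.length + q.length - 1) limit
  (List.range n).map fun s =>
    (List.range (s + 1)).foldl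
      (fun acc i =>
        if i < p.length ∧ s - i < q.length then acc + p.getD i 0 * q.getD (s - i) 0 else acc) 0

-- port of Source B's `while e > 0` binary-exponentiation loop (e stays nonnegative, so Nat)
def powLoop (limit : Nat) (result : List Int) (base : List Int) (e : Nat) : List Int :=
  if e = 0 then result
  else powLoop limit (if e % 2 = 1 then mulT limit result base else result)
       (mulT limit base base) (e / 2)

def count_deficit_sequences_alt (length : Int) (deficit : Int) : Int :=
  if length < 0 ∨ deficit < 0 then 0
  else
    let limit := deficit.toNat + 1
    let result := powLoop limit [1] (List.replicate (min 10 limit) 1) length.toNat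
    if deficit.toNat < result.length then result.getD deficit.toNat 0 else 0
-- ===== PRECONDITION & SPEC =====
def Spec_count_deficit_sequences (length : Int) (deficit : Int) (out : Int) : Prop := out = count_deficit_sequences_alt length deficit
instance (length : Int) (deficit : Int) (out : Int) : Decidable (Spec_count_deficit_sequences length deficit out) := by unfold Spec_count_deficit_sequences; infer_instance

-- ===== CLAIM (what is proved, stated in full; the proofs are below) =====
def Claim_equal_count_deficit_sequences : Prop := ∀ (length : Int) (deficit : Int), Dom_count_deficit_sequences length deficit → Spec_count_deficit_sequences length deficit (count_deficit_sequences length deficit)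

-- ===== LEMMAS AND PROOFS =====

-- The common mathematical reference: Npow k s = coefficient of z^s in (1+z+...+z^9)^k.
def Wf (s : Nat) : Int := if s < 10 then 1 else 0

def convf (f g : Nat → Int) (s : Nat) : Int := ∑ i ∈ Finset.range (s + 1), f i * g (s - i)

def Npow : Nat → Nat → Int
  | 0, s => if s = 0 then 1 else 0
  | (k+1), s => convf (Npow k) Wf s

def coeffL (p : List Int) (s : Nat) : Int := p.getD s 0

theorem foldl_add_sum_nat (g : Nat → Int) : ∀ (l : List Nat) (c : Int),
    l.foldl (fun a x => a + g x) c = c + (l.map g).sum := by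
  intro l
  induction l with
  | nil => intro c; simp
  | cons x xs ih => intro c; simp [List.foldl_cons, ih]; ring

theorem sum_map_range (g : Nat → Int) : ∀ n : Nat,
    ((List.range n).map g).sum = ∑ i ∈ Finset.range n, g i := by
  intro n
  induction n with
  | zero => simp
  | succ n ih => simp [List.range_succ, Finset.sum_range_succ, ih]

theorem mk_Npow (k : Nat) : PowerSeries.mk (Npow k) = (PowerSeries.mk Wf) ^ k := by
  induction k with
  | zero =>
    ext s
    simp [PowerSeries.coeff_mk, Npow, PowerSeries.coeff_one]
  | succ k ih =>
    ext s
    rw [PowerSeries.coeff_mk]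
    show convf (Npow k) Wf s = _
    rw [pow_succ, ← ih, PowerSeries.coeff_mul,
      Finset.Nat.sum_antidiagonal_eq_sum_range_succ_mk]
    simp [convf, PowerSeries.coeff_mk]

theorem Npow_coeff (k s : Nat) :
    Npow k s = PowerSeries.coeff s ((PowerSeries.mk Wf) ^ k) := by
  rw [← mk_Npow, PowerSeries.coeff_mk]

theorem Npow_add (a b s : Nat) : convf (Npow a) (Npow b) s = Npow (a + b) s := by
  show (∑ i ∈ Finset.range (s+1), Npow a i * Npow b (s - i)) = _
  rw [Npow_coeff (a+b) s, pow_add, PowerSeries.coeff_mul,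
    Finset.Nat.sum_antidiagonal_eq_sum_range_succ_mk]
  refine Finset.sum_congr rfl ?_
  intro i _
  rw [Npow_coeff, Npow_coeff]

theorem Npow_one (s : Nat) : Npow 1 s = Wf s := by
  show convf (Npow 0) Wf s = Wf s
  unfold convf
  rw [Finset.sum_eq_single 0]
  · simp [Npow]
  · intro i _ hi; simp [Npow, hi]
  · intro h; simp at h

theorem convf_congr (f f' g g' : Nat → Int) (s : Nat)
    (hf : ∀ i ≤ s, f i = f' i) (hg : ∀ i ≤ s, g i = g' i) :
    convf f g s = convf f' g' s := by
  unfold convf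
  refine Finset.sum_congr rfl ?_
  intro i hi
  rw [Finset.mem_range] at hi
  rw [hf i (by omega), hg (s - i) (by omega)]

theorem length_mulT (limit : Nat) (p q : List Int) :
    (mulT limit p q).length = min (p.length + q.length - 1) limit := by
  simp [mulT]

theorem coeffL_mulT (limit : Nat) (p q : List Int) (hp : p ≠ []) (hq : q ≠ [])
    (s : Nat) (hs : s < limit) :
    coeffL (mulT limit p q) s = convf (coeffL p) (coeffL q) s := by
  have hp1 : 1 ≤ p.length := List.length_pos_iff.mpr hp
  have hq1 : 1 ≤ q.length := List.length_pos_iff.mpr hq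
  by_cases hsn : s < min (p.length + q.length - 1) limit
  · have hgd : coeffL (mulT limit p q) s =
        (List.range (s + 1)).foldl
          (fun acc i =>
            if i < p.length ∧ s - i < q.length then acc + p.getD i 0 * q.getD (s - i) 0 else acc) 0 := by
      unfold coeffL mulT
      rw [List.getD_eq_getElem _ _ (by simpa using hsn)]
      simp
    rw [hgd]
    have hstep : (fun (acc : Int) (i : Nat) =>
        if i < p.length ∧ s - i < q.length then acc + p.getD i 0 * q.getD (s - i) 0 else acc)
        = fun acc i => acc + (if i < p.length ∧ s - i < q.length then p.getD i 0 * q.getD (s - i) 0 else 0) := by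
      funext acc i; split <;> simp
    rw [hstep, foldl_add_sum_nat, sum_map_range, zero_add]
    unfold convf coeffL
    refine Finset.sum_congr rfl ?_
    intro i _
    split
    · rfl
    · rename_i h
      rw [Classical.not_and_iff_not_or_not] at h
      rcases h with h | h
      · rw [List.getD_eq_default _ _ (by omega)]; ring
      · rw [List.getD_eq_default (l := q) _ (by omega)]; ring
  · have hlen : p.length + q.length - 1 ≤ s := by omega
    have h0 : coeffL (mulT limit p q) s = 0 := by
      unfold coeffL
      rw [List.getD_eq_default]
      rw [length_mulT]; omega
    rw [h0]
    unfold convf coeffL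
    symm
    refine Finset.sum_eq_zero ?_
    intro i _
    by_cases hip : i < p.length
    · rw [List.getD_eq_default (l := q) _ (by omega)]; ring
    · rw [List.getD_eq_default (l := p) _ (by omega)]; ring

theorem powLoop_spec (limit : Nat) (hlim : 1 ≤ limit) :
    ∀ e res base a b,
    res ≠ [] → res.length ≤ limit → base ≠ [] → base.length ≤ limit →
    (∀ s < limit, coeffL res s = Npow a s) →
    (∀ s < limit, coeffL base s = Npow b s) →
    ∀ s < limit, coeffL (powLoop limit res base e) s = Npow (a + e * b) s := by
  intro e
  induction e using Nat.strong_induction_on with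
  | _ e ih =>
    intro res base a b hr hrl hb hbl hcr hcb s hs
    by_cases he : e = 0
    · subst he; rw [powLoop]; simpa using hcr s hs
    · rw [powLoop, if_neg he]
      have hne : ∀ (x y : List Int), x ≠ [] → y ≠ [] → mulT limit x y ≠ [] := by
        intro x y hx hy
        have hlm := length_mulT limit x y
        have hx1 : 1 ≤ x.length := List.length_pos_iff.mpr hx
        have hy1 : 1 ≤ y.length := List.length_pos_iff.mpr hy
        intro hnil
        rw [hnil] at hlm
        simp at hlm
        omega
      have hle : ∀ (x y : List Int), (mulT limit x y).length ≤ limit := by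
        intro x y; rw [length_mulT]; omega
      have hmul : ∀ (x y : List Int) (u v : Nat), x ≠ [] → y ≠ [] →
          (∀ s < limit, coeffL x s = Npow u s) → (∀ s < limit, coeffL y s = Npow v s) →
          ∀ s < limit, coeffL (mulT limit x y) s = Npow (u + v) s := by
        intro x y u v hx hy hcx hcy t ht
        rw [coeffL_mulT limit x y hx hy t ht, ← Npow_add]
        exact convf_congr _ _ _ _ t (fun i hi => hcx i (by omega)) (fun i hi => hcy i (by omega))
      have hq : e / 2 < e := Nat.div_lt_self (by omega) (by omega)
      by_cases hpar : e % 2 = 1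
      · rw [if_pos hpar]
        have hrec := ih (e / 2) hq (mulT limit res base) (mulT limit base base) (a + b) (b + b)
          (hne _ _ hr hb) (hle _ _) (hne _ _ hb hb) (hle _ _)
          (hmul _ _ _ _ hr hb hcr hcb) (hmul _ _ _ _ hb hb hcb hcb) s hs
        rw [hrec]
        congr 1
        have h2 : e = 2 * (e / 2) + 1 := by omega
        set q2 := e / 2
        rw [h2]; ring
      · rw [if_neg hpar]
        have hrec := ih (e / 2) hq res (mulT limit base base) a (b + b)
          hr hrl (hne _ _ hb hb) (hle _ _)
          hcr (hmul _ _ _ _ hb hb hcb hcb) s hs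
        rw [hrec]
        congr 1
        have h2 : e = 2 * (e / 2) := by omega
        set q2 := e / 2
        rw [h2]; ring

theorem alt_eq_Npow (L d : Int) (hL : 0 ≤ L) (hd : 0 ≤ d) :
    count_deficit_sequences_alt L d = Npow L.toNat d.toNat := by
  have hres : ∀ s < d.toNat + 1, coeffL [1] s = Npow 0 s := by
    intro s _
    match s with
    | 0 => rfl
    | s+1 => simp [coeffL, Npow]
  have hbase : ∀ s < d.toNat + 1,
      coeffL (List.replicate (min 10 (d.toNat + 1)) 1) s = Npow 1 s := by
    intro s hs
    rw [Npow_one]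
    unfold coeffL Wf
    by_cases h : s < min 10 (d.toNat + 1)
    · rw [List.getD_eq_getElem _ _ (by simpa using h), List.getElem_replicate,
        if_pos (by omega)]
    · rw [List.getD_eq_default _ _ (by simp only [List.length_replicate]; omega),
        if_neg (by omega)]
  have hmain := powLoop_spec (d.toNat + 1) (by omega) L.toNat [1]
    (List.replicate (min 10 (d.toNat + 1)) 1) 0 1
    (by simp) (by simp) (by simp) (by simp) hres hbase d.toNat (by omega)
  simp only [zero_add, mul_one] at hmain
  unfold count_deficit_sequences_alt
  rw [if_neg (by omega)]
  show (if d.toNat < (powLoop (d.toNat + 1) [1] (List.replicate (min 10 (d.toNat + 1)) 1) L.toNat).length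
      then (powLoop (d.toNat + 1) [1] (List.replicate (min 10 (d.toNat + 1)) 1) L.toNat).getD d.toNat 0
      else 0) = Npow L.toNat d.toNat
  split
  · exact hmain
  · rw [← hmain]
    unfold coeffL
    rw [List.getD_eq_default _ _ (by omega)]
-- ===== A-side: the multiplicative comb loop computes Nat.choose =====

theorem comb_loop (A : Nat) : ∀ m : Nat,
    (PySem.List.pyRange 1 ((m : Int) + 1) 1).foldl
      (fun res i => PySem.Int.floordiv (res * ((A : Int) + i)) i) 1
      = ((A + m).choose m : Int) := by
  intro m
  induction m with
  | zero =>
    rw [PySem.List.pyRange_one_eq_nil (by norm_num)]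
    simp
  | succ m ih =>
    have h1 : (((m + 1 : Nat) : Int) + 1) = ((m : Int) + 1) + 1 := by push_cast; ring
    rw [h1, PySem.List.pyRange_one_succ_right (by omega), List.foldl_append, ih]
    simp only [List.foldl_cons, List.foldl_nil]
    have hc : ((A : Int) + ((m : Int) + 1)) = ((A + m + 1 : Nat) : Int) := by push_cast; ring
    rw [hc]
    have hmul : ((A + m).choose m : Int) * ((A + m + 1 : Nat) : Int)
        = (((A + m + 1).choose (m + 1) * (m + 1) : Nat) : Int) := by
      have h := Nat.add_one_mul_choose_eq (A + m) m
      push_cast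
      push_cast at h
      nlinarith [h]
    have hm1 : ((m : Int) + 1) = ((m + 1 : Nat) : Int) := by push_cast; ring
    rw [hmul, hm1, PySem.Int.floordiv_natCast]
    rw [Nat.mul_div_cancel _ (Nat.succ_pos m), Nat.add_assoc]

theorem combA_eq (n k : Int) :
    combA n k = if 0 ≤ k ∧ k ≤ n then ((n.toNat.choose k.toNat : Nat) : Int) else 0 := by
  unfold combA
  by_cases hg : k < 0 ∨ n < k
  · rw [if_pos hg, if_neg (by omega)]
  · rw [if_neg hg]
    rw [if_pos (show (0:Int) ≤ k ∧ k ≤ n by omega)]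
    have h0k : 0 ≤ k := by omega
    have hkn : k ≤ n := by omega
    show (if min k (n - k) = 0 then 1
      else (PySem.List.pyRange 1 (min k (n - k) + 1) 1).foldl
        (fun res i => PySem.Int.floordiv (res * (n - min k (n - k) + i)) i) 1) = _
    by_cases hk0 : min k (n - k) = 0
    · rw [if_pos hk0]
      have hcase : k = 0 ∨ k = n := by omega
      rcases hcase with h | h
      · rw [h]; simp
      · rw [h]; simp [Nat.choose_self]
    · rw [if_neg hk0]
      obtain ⟨A, hA⟩ : ∃ A : Nat, n - min k (n - k) = (A : Int) := ⟨(n - min k (n - k)).toNat, by omega⟩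
      obtain ⟨Kn, hKn⟩ : ∃ Kn : Nat, min k (n - k) = (Kn : Int) := ⟨(min k (n - k)).toNat, by omega⟩
      have hfun : (fun (res : Int) (i : Int) => PySem.Int.floordiv (res * (n - min k (n - k) + i)) i)
          = fun res i => PySem.Int.floordiv (res * ((A : Int) + i)) i := by
        funext res i; rw [hA]
      rw [hfun, hKn, comb_loop A Kn]
      have hAK : A + Kn = n.toNat := by omega
      rw [hAK]
      congr 1
      have hcase : min k (n - k) = k ∨ min k (n - k) = n - k := min_choice _ _
      rcases hcase with h | h
      · congr 1; omega
      · have hKn' : Kn = n.toNat - k.toNat := by omega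
        rw [hKn', Nat.choose_symm (by omega)]

-- ===== A-side: the inclusion-exclusion identity, via power series =====

theorem mkWf_eq : PowerSeries.mk Wf
    = (1 - PowerSeries.X ^ 10) * PowerSeries.mk (fun _ => (1 : Int)) := by
  ext s
  rw [sub_mul, one_mul, map_sub, PowerSeries.coeff_mk,
    mul_comm (PowerSeries.X ^ 10), PowerSeries.coeff_mul_X_pow', PowerSeries.coeff_mk]
  unfold Wf
  by_cases h : 10 ≤ s
  · rw [if_pos h, PowerSeries.coeff_mk, if_neg (by omega)]; ring
  · rw [if_neg h, if_pos (by omega)]; ring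

theorem hockey (L : Nat) : ∀ b : Nat,
    (∑ i ∈ Finset.range (b + 1), (i + L).choose L) = (b + L + 1).choose (L + 1) := by
  intro b
  induction b with
  | zero => simp
  | succ b ih =>
    rw [Finset.sum_range_succ, ih]
    have hbl : b + 1 + L = b + L + 1 := by omega
    have hbl2 : b + 1 + L + 1 = (b + L + 1) + 1 := by omega
    rw [hbl, Nat.choose_succ_succ' (b + L + 1) L]
    omega

theorem mk1_pow_coeff (L : Nat) : ∀ b : Nat,
    PowerSeries.coeff b ((PowerSeries.mk (fun _ => (1 : Int))) ^ (L + 1))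
      = ((b + L).choose L : Int) := by
  induction L with
  | zero => intro b; simp [PowerSeries.coeff_mk]
  | succ L ih =>
    intro b
    rw [pow_succ, PowerSeries.coeff_mul, Finset.Nat.sum_antidiagonal_eq_sum_range_succ_mk]
    have hterm : ∀ i ∈ Finset.range (b + 1),
        PowerSeries.coeff i ((PowerSeries.mk (fun _ => (1 : Int))) ^ (L + 1))
          * PowerSeries.coeff (b - i) (PowerSeries.mk (fun _ => (1 : Int)))
        = (((i + L).choose L : Nat) : Int) := by
      intro i _
      rw [ih i, PowerSeries.coeff_mk, mul_one]
    rw [Finset.sum_congr rfl hterm, ← Nat.cast_sum, hockey L b]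
    have hb : b + (L + 1) = b + L + 1 := by omega
    rw [hb]

theorem binom_pow (L : Nat) (a : Nat) :
    PowerSeries.coeff a ((1 - PowerSeries.X ^ 10 : PowerSeries Int) ^ L)
      = if a % 10 = 0 then ((-1 : Int) ^ (a / 10) * (L.choose (a / 10) : Int)) else 0 := by
  have hsub : (1 - PowerSeries.X ^ 10 : PowerSeries Int) = -(PowerSeries.X ^ 10) + 1 := by ring
  have hexp : ((-(PowerSeries.X ^ 10 : PowerSeries Int)) + 1) ^ L
      = ∑ k ∈ Finset.range (L + 1),
          PowerSeries.C (R := Int) ((-1 : Int) ^ k * (L.choose k : Int)) * PowerSeries.X ^ (10 * k) := by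
    rw [add_pow]
    refine Finset.sum_congr rfl ?_
    intro k _
    rw [one_pow, mul_one, neg_pow, ← pow_mul]
    rw [← map_natCast (PowerSeries.C (R := Int)) (L.choose k), map_mul, map_pow, map_neg,
      map_one]
    ring
  rw [hsub, hexp, map_sum]
  have hterm : ∀ k ∈ Finset.range (L + 1),
      PowerSeries.coeff a (PowerSeries.C (R := Int) ((-1 : Int) ^ k * (L.choose k : Int)) * PowerSeries.X ^ (10 * k))
        = if a = 10 * k then ((-1 : Int) ^ k * (L.choose k : Int)) else 0 := by
    intro k _
    rw [PowerSeries.coeff_C_mul, PowerSeries.coeff_X_pow]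
    split <;> simp
  rw [Finset.sum_congr rfl hterm]
  by_cases h10 : a % 10 = 0
  · have hcond : ∀ k ∈ Finset.range (L + 1),
        (if a = 10 * k then ((-1 : Int) ^ k * (L.choose k : Int)) else 0)
        = if k = a / 10 then ((-1 : Int) ^ k * (L.choose k : Int)) else 0 := by
      intro k _
      congr 1
      simp only [eq_iff_iff]
      omega
    rw [Finset.sum_congr rfl hcond, Finset.sum_ite_eq' (Finset.range (L + 1))]
    rw [if_pos h10]
    split
    · rfl
    · rename_i hout
      rw [Finset.mem_range] at hout
      rw [Nat.choose_eq_zero_of_lt (by omega)]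
      push_cast
      ring
  · rw [if_neg h10]
    refine Finset.sum_eq_zero ?_
    intro k _
    rw [if_neg (by omega)]
theorem ie_identity (L d : Nat) :
    (∑ j ∈ Finset.range (d / 10 + 1),
      (-1 : Int) ^ j * ((L + 1).choose j : Int) * ((d - 10 * j + L).choose (d - 10 * j) : Int))
      = Npow (L + 1) d := by
  rw [Npow_coeff, mkWf_eq, mul_pow, PowerSeries.coeff_mul,
    Finset.Nat.sum_antidiagonal_eq_sum_range_succ_mk]
  have hterm : ∀ a ∈ Finset.range (d + 1),
      PowerSeries.coeff a ((1 - PowerSeries.X ^ 10 : PowerSeries Int) ^ (L + 1)) *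
        PowerSeries.coeff (d - a) ((PowerSeries.mk fun _ => (1 : Int)) ^ (L + 1))
      = (if a % 10 = 0 then (-1 : Int) ^ (a / 10) * (((L + 1).choose (a / 10) : Nat) : Int) else 0)
          * (((d - a + L).choose L : Nat) : Int) := by
    intro a _
    rw [binom_pow, mk1_pow_coeff]
  rw [Finset.sum_congr rfl hterm]
  have himg : (Finset.range (d / 10 + 1)).image (fun j => 10 * j) ⊆ Finset.range (d + 1) := by
    intro a ha
    rw [Finset.mem_image] at ha
    obtain ⟨j, hj, rfl⟩ := ha
    rw [Finset.mem_range] at hj ⊢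
    omega
  have hzero : ∀ a ∈ Finset.range (d + 1), a ∉ (Finset.range (d / 10 + 1)).image (fun j => 10 * j) →
      (if a % 10 = 0 then (-1 : Int) ^ (a / 10) * (((L + 1).choose (a / 10) : Nat) : Int) else 0)
        * (((d - a + L).choose L : Nat) : Int) = 0 := by
    intro a ha hnot
    rw [Finset.mem_range] at ha
    by_cases h10 : a % 10 = 0
    · exfalso
      apply hnot
      rw [Finset.mem_image]
      exact ⟨a / 10, by rw [Finset.mem_range]; omega, by omega⟩
    · rw [if_neg h10, zero_mul]
  rw [← Finset.sum_subset himg hzero,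
    Finset.sum_image (by intro x _ y _ h; have h10 : 10 * x = 10 * y := h; omega)]
  refine Finset.sum_congr rfl ?_
  intro j hj
  rw [Finset.mem_range] at hj
  have h1 : (10 * j) % 10 = 0 := by omega
  have h2 : (10 * j) / 10 = j := by omega
  rw [if_pos h1, h2]
  have hsym := Nat.choose_symm (show L ≤ d - 10 * j + L by omega)
  rw [show d - 10 * j + L - L = d - 10 * j from by omega] at hsym
  rw [← hsym]

theorem sign_if (k : Nat) (x : Int) : (if k % 2 = 1 then -x else x) = (-1 : Int) ^ k * x := by
  rcases Nat.even_or_odd k with h | h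
  · rw [if_neg (by have := Nat.even_iff.mp h; omega), Even.neg_one_pow h, one_mul]
  · rw [if_pos (Nat.odd_iff.mp h), Odd.neg_one_pow h]
    ring

theorem foldl_signed_pyRange (t : Int → Int) (n : Nat) :
    (PySem.List.pyRange 0 (n : Int) 1).foldl
      (fun res j => if PySem.Int.mod j 2 = 1 then res - t j else res + t j) 0
      = ∑ k ∈ Finset.range n, (if k % 2 = 1 then -(t (k : Int)) else t (k : Int)) := by
  suffices h : ∀ c : Int, (PySem.List.pyRange 0 (n : Int) 1).foldl
      (fun res j => if PySem.Int.mod j 2 = 1 then res - t j else res + t j) c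
      = c + ∑ k ∈ Finset.range n, (if k % 2 = 1 then -(t (k : Int)) else t (k : Int)) by
    rw [h 0, zero_add]
  induction n with
  | zero =>
    intro c
    rw [PySem.List.pyRange_one_eq_nil (by norm_num)]
    simp
  | succ n ih =>
    intro c
    rw [show ((n + 1 : Nat) : Int) = ((n : Nat) : Int) + 1 from by push_cast; ring,
      PySem.List.pyRange_one_succ_right (by omega), List.foldl_append, ih c]
    simp only [List.foldl_cons, List.foldl_nil]
    rw [Finset.sum_range_succ]
    have hm : PySem.Int.mod ((n : Nat) : Int) 2 = ((n % 2 : Nat) : Int) := by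
      exact_mod_cast PySem.Int.mod_natCast n 2
    by_cases hn : n % 2 = 1
    · rw [hm, if_pos (by omega), if_pos hn]; ring
    · rw [hm, if_neg (by omega), if_neg hn]; ring

theorem A_fold (length deficit : Int) (hd : 0 ≤ deficit) (hL0 : length ≠ 0) :
    count_deficit_sequences length deficit
      = ∑ k ∈ Finset.range (deficit.toNat / 10 + 1),
          (if k % 2 = 1
            then -(combA length (k : Int)
                    * combA (deficit - 10 * (k : Int) + length - 1) (deficit - 10 * (k : Int)))
            else combA length (k : Int)
                    * combA (deficit - 10 * (k : Int) + length - 1) (deficit - 10 * (k : Int))) := by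
  unfold count_deficit_sequences
  rw [if_neg (by omega), if_neg hL0]
  have hfd : PySem.Int.floordiv deficit 10 + 1 = ((deficit.toNat / 10 + 1 : Nat) : Int) := by
    rw [show deficit = ((deficit.toNat : Nat) : Int) from by omega]
    have h := PySem.Int.floordiv_natCast deficit.toNat 10
    push_cast
    push_cast at h
    rw [show ((deficit.toNat : Nat) : Int).toNat = deficit.toNat from by omega]
    omega
  show (PySem.List.pyRange 0 (PySem.Int.floordiv deficit 10 + 1) 1).foldl
      (fun res j => if PySem.Int.mod j 2 = 1
        then res - combA length j * combA (deficit - 10 * j + length - 1) (deficit - 10 * j)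
        else res + combA length j * combA (deficit - 10 * j + length - 1) (deficit - 10 * j)) 0
      = _
  rw [hfd]
  exact foldl_signed_pyRange
    (fun j => combA length j * combA (deficit - 10 * j + length - 1) (deficit - 10 * j))
    (deficit.toNat / 10 + 1)

theorem count_deficit_sequences_eq (length deficit : Int) :
    count_deficit_sequences length deficit = count_deficit_sequences_alt length deficit := by
  by_cases hd : deficit < 0
  · unfold count_deficit_sequences count_deficit_sequences_alt
    rw [if_pos hd, if_pos (Or.inr hd)]
  · by_cases hL : length < 0
    · have hB : count_deficit_sequences_alt length deficit = 0 := by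
        unfold count_deficit_sequences_alt
        rw [if_pos (Or.inl hL)]
      rw [hB, A_fold length deficit (by omega) (by omega)]
      refine Finset.sum_eq_zero ?_
      intro k _
      have hnc : ¬((0 : Int) ≤ (k : Int) ∧ (k : Int) ≤ length) := by omega
      rw [combA_eq length (k : Int), if_neg hnc]
      split <;> ring
    · by_cases hL0 : length = 0
      · subst hL0
        unfold count_deficit_sequences
        rw [if_neg (by omega), if_pos rfl, alt_eq_Npow 0 deficit (by omega) (by omega)]
        show _ = Npow 0 deficit.toNat
        unfold Npow
        split_ifs <;> omega
      · have h1L : 1 ≤ length := by omega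
        obtain ⟨L', hL'⟩ : ∃ L' : Nat, length.toNat = L' + 1 := ⟨length.toNat - 1, by omega⟩
        have hlen : length = ((L' + 1 : Nat) : Int) := by omega
        rw [alt_eq_Npow length deficit (by omega) (by omega), A_fold length deficit (by omega) hL0,
          hL', ← ie_identity L' deficit.toNat]
        refine Finset.sum_congr rfl ?_
        intro k hk
        rw [Finset.mem_range] at hk
        have hdd0 : 0 ≤ deficit - 10 * (k : Int) := by omega
        have hcA : combA length (k : Int) = (((L' + 1).choose k : Nat) : Int) := by
          rw [combA_eq]
          by_cases hkL : (k : Int) ≤ length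
          · rw [if_pos ⟨by omega, hkL⟩, hL', Int.toNat_natCast]
          · rw [if_neg (by omega), Nat.choose_eq_zero_of_lt (by omega)]
            simp
        have hcB : combA (deficit - 10 * (k : Int) + length - 1) (deficit - 10 * (k : Int))
            = (((deficit.toNat - 10 * k + L').choose (deficit.toNat - 10 * k) : Nat) : Int) := by
          rw [combA_eq, if_pos ⟨hdd0, by omega⟩]
          have e1 : (deficit - 10 * (k : Int) + length - 1).toNat = deficit.toNat - 10 * k + L' := by
            omega
          have e2 : (deficit - 10 * (k : Int)).toNat = deficit.toNat - 10 * k := by omega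
          rw [e1, e2]
        rw [hcA, hcB, sign_if]
        ring

-- ===== VERDICT (by name: the statement is the Claim_ definition above) =====
theorem count_deficit_sequences_spec : Claim_equal_count_deficit_sequences := by
  intro length deficit _
  exact count_deficit_sequences_eq length deficit
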